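-- pv_equiv track=rewrite | github.com/EBlundellSparta/Data21Notes | Hangman_Example.py | hidden_phrase
-- ===== SOURCE A (Python) =====
-- def hidden_phrase(word: str):
--     hid_phr = ""
--     for letter in word:
--         if letter != " ":
--             hid_phr += "_"
--         else:
--             hid_phr += "/"
--     return hid_phr
-- ===== SOURCE B (Python) =====
-- def hidden_phrase(word: str):
--     return "/".join("_" * len(part) for part in word.split(" "))
-- ===== Notes on version B (the rewrite author's own statement) =====
-- stated objective: faster
-- what changed: Replaces the per-character loop with a running string accumulator by splitting on single spaces, mapping each segment to an underscore run of its length, and joining with slashes.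
import Mathlib
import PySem

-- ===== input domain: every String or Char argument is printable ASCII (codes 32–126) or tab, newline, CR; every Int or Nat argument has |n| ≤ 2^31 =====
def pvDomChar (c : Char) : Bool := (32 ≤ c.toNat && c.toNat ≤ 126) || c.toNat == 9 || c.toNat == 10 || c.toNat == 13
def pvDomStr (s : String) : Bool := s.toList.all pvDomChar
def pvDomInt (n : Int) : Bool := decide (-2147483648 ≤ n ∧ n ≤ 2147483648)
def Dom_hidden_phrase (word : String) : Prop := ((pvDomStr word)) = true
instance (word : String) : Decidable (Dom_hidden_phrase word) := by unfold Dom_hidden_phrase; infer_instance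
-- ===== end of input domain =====

-- B replaces A's per-character accumulator loop with split-on-space / map-to-underscores / join-with-slash (idiomatic decomposition).


-- ===== PORT A =====
-- hid_phr = ""; for letter in word: hid_phr += "_" if letter != " " else "/"
def hidden_phrase (word : String) : String :=
  String.ofList (word.toList.foldl
    (fun hid_phr letter => hid_phr ++ [if letter ≠ ' ' then '_' else '/']) [])

-- ===== PORT B =====
-- "/".join("_" * len(part) for part in word.split(" "))
def hidden_phrase_alt (word : String) : String :=
  String.ofList (PySem.Chars.join ['/']
    ((PySem.Chars.splitOn word.toList [' ']).map
      (fun part => PySem.List.pyRepeat ['_'] (PySem.List.len part))))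

-- ===== PRECONDITION & SPEC =====
def Spec_hidden_phrase (word : String) (out : String) : Prop := out = hidden_phrase_alt word
instance (word : String) (out : String) : Decidable (Spec_hidden_phrase word out) := by unfold Spec_hidden_phrase; infer_instance

-- ===== CLAIM (what is proved, stated in full; the proofs are below) =====
def Claim_equal_hidden_phrase : Prop := ∀ (word : String), Dom_hidden_phrase word → Spec_hidden_phrase word (hidden_phrase word)

-- ===== LEMMAS AND PROOFS =====

-- structural split of a char list on single spaces: (first segment, remaining segments)
def mySplit : List Char → List Char × List (List Char)
  | [] => ([], [])
  | c :: cs =>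
    let p := mySplit cs
    if c = ' ' then ([], p.1 :: p.2) else (c :: p.1, p.2)

theorem splitOn_go_spec (fuel : Nat) (l cur : List Char) (acc : List (List Char))
    (h : l.length ≤ fuel) :
    PySem.Chars.splitOn.go [' '] fuel l cur acc =
      acc.reverse ++ ((cur.reverse ++ (mySplit l).1) :: (mySplit l).2) := by
  induction fuel generalizing l cur acc with
  | zero =>
    cases l with
    | nil => simp [PySem.Chars.splitOn.go, mySplit]
    | cons c cs => simp at h
  | succ fuel ih =>
    cases l with
    | nil => simp [PySem.Chars.splitOn.go, mySplit]
    | cons c cs =>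
      by_cases hc : c = ' '
      · subst hc
        rw [show PySem.Chars.splitOn.go [' '] (fuel+1) (' ' :: cs) cur acc =
            PySem.Chars.splitOn.go [' '] fuel cs [] (cur.reverse :: acc) by
          simp [PySem.Chars.splitOn.go, List.isPrefixOf]]
        rw [ih cs [] (cur.reverse :: acc) (by simpa using Nat.lt_succ_iff.mp (by simpa using h))]
        simp [mySplit]
      · rw [show PySem.Chars.splitOn.go [' '] (fuel+1) (c :: cs) cur acc =
            PySem.Chars.splitOn.go [' '] fuel cs (c :: cur) acc by
          simp [PySem.Chars.splitOn.go, List.isPrefixOf, Ne.symm hc]]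
        rw [ih cs (c :: cur) acc (by simpa using Nat.lt_succ_iff.mp (by simpa using h))]
        simp [mySplit, hc]

theorem splitOn_eq_mySplit (cs : List Char) :
    PySem.Chars.splitOn cs [' '] = (mySplit cs).1 :: (mySplit cs).2 := by
  unfold PySem.Chars.splitOn
  rw [splitOn_go_spec _ _ _ _ (by omega)]
  simp

theorem mySplit_cons_space (cs : List Char) :
    mySplit (' ' :: cs) = ([], (mySplit cs).1 :: (mySplit cs).2) := by simp [mySplit]

theorem mySplit_cons_ne (c : Char) (cs : List Char) (hc : c ≠ ' ') :
    mySplit (c :: cs) = (c :: (mySplit cs).1, (mySplit cs).2) := by simp [mySplit, hc]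

theorem join_cons_head (sep : List Char) (x : Char) (p : List Char) (ps : List (List Char)) :
    PySem.Chars.join sep ((x :: p) :: ps) = x :: PySem.Chars.join sep (p :: ps) := by
  cases ps with
  | nil => simp [PySem.Chars.join_singleton]
  | cons q r => simp [PySem.Chars.join_cons_cons]

theorem join_underscores (cs : List Char) :
    PySem.Chars.join ['/']
      (((mySplit cs).1 :: (mySplit cs).2).map
        (fun part => List.replicate part.length '_')) =
      cs.map (fun letter => if letter ≠ ' ' then '_' else '/') := by
  induction cs with
  | nil => simp [mySplit, PySem.Chars.join_singleton]
  | cons c cs ih =>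
    by_cases hc : c = ' '
    · subst hc
      rw [mySplit_cons_space]
      simp only [List.map_cons]
      rw [PySem.Chars.join_cons_cons]
      simpa using ih
    · rw [mySplit_cons_ne c cs hc]
      simp only [List.map_cons]
      have : List.replicate (c :: (mySplit cs).1).length '_' =
          '_' :: List.replicate (mySplit cs).1.length '_' := by simp [List.replicate]
      rw [this, join_cons_head]
      simp only [List.map_cons] at ih
      simp [ih, hc]

-- ===== VERDICT (by name: the statement is the Claim_ definition above) =====
theorem hidden_phrase_spec : Claim_equal_hidden_phrase := by
  intro word _
  unfold Spec_hidden_phrase hidden_phrase hidden_phrase_alt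
  rw [PySem.List.foldl_append_singleton_eq_map, splitOn_eq_mySplit]
  have hrep : ∀ part : List Char,
      PySem.List.pyRepeat ['_'] (PySem.List.len part) = List.replicate part.length '_' := by
    intro part
    rw [PySem.List.len_eq, PySem.List.pyRepeat_singleton]
    simp
  simp only [hrep]
  rw [join_underscores]
  simp
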